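-- pv_equiv track=rewrite | github.com/paepcke/ElephantCallAI | src/analyze_adversarial_exp.py | count_same_examples
-- ===== SOURCE A (Python) =====
-- def count_same_examples(file_discoveries):
-- 	"""
-- 		Count the number of examples that were flagged by all
-- 		of the different models
-- 	"""
-- 	# Since we are checking same across all
-- 	# it is sufficient to look through the files
-- 	# discovered by one model
-- 	files_shared = 0
-- 	model_0 = file_discoveries[0]
-- 	for file in model_0:
-- 		# Check if it is found by the others
-- 		found = True
-- 		for model_x_files in file_discoveries:
-- 			if not file in model_x_files:
-- 				found = False
-- 				break
--
-- 		if found: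
-- 			files_shared += 1
--
-- 	return files_shared
-- ===== SOURCE B (Python) =====
-- def count_same_examples(file_discoveries):
--     common = set(file_discoveries[0])
--     for m in file_discoveries[1:]:
--         common &= set(m)
--     return sum(1 for f in file_discoveries[0] if f in common)
-- ===== Notes on version B (the rewrite author's own statement) =====
-- stated objective: alternative
-- what changed: Replaces the per-file nested rescan of every model's list with a one-time set-intersection accumulator over the models followed by a single counting pass over the first list (multiplicity preserved).
import Mathlib
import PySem

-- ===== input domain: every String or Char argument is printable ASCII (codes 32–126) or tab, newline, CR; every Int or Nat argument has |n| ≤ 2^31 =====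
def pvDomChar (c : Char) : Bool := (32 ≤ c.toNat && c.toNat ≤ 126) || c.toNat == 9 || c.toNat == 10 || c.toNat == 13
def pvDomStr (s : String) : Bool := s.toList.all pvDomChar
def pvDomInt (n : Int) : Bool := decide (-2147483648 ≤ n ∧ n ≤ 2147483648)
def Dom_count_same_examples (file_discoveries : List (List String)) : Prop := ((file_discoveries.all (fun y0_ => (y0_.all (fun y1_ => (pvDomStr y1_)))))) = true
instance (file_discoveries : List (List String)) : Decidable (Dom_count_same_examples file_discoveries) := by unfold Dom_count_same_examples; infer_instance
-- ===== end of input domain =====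

-- B builds the cross-model intersection once, then counts the first list's files (with multiplicity)
-- that lie in it — replacing A's nested per-file rescan; equivalence proved on nonempty input.

-- ===== PORT A =====
def count_same_examples (file_discoveries : List (List String)) : Int :=
  -- model_0 = file_discoveries[0]; IndexError (none) on empty input, excluded by Pre_
  match PySem.List.pyGet? file_discoveries 0 with
  | none => 0
  | some model_0 =>
    -- for file in model_0: inner loop over all models with break = List.all
    model_0.foldl (fun files_shared file =>
      if file_discoveries.all (fun model_x_files => decide (file ∈ model_x_files)) then
        files_shared + 1
      else files_shared) 0

-- ===== PORT B =====
def count_same_examples_alt (file_discoveries : List (List String)) : Int :=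
  match PySem.List.pyGet? file_discoveries 0 with
  | none => 0
  | some m0 =>
    -- common = set(file_discoveries[0]); for m in file_discoveries[1:]: common &= set(m)
    let common : PySem.Set String :=
      (PySem.List.slice file_discoveries (some 1) none).foldl
        (fun s m => PySem.Set.inter s (PySem.Set.ofList m)) (PySem.Set.ofList m0)
    -- sum(1 for f in file_discoveries[0] if f in common)
    m0.foldl (fun acc f => if PySem.Set.contains common f then acc + 1 else acc) 0

-- ===== PRECONDITION & SPEC =====
-- Pre_ excludes only the empty list, on which A raises IndexError (file_discoveries[0]).
def Pre_count_same_examples (file_discoveries : List (List String)) : Prop :=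
  file_discoveries ≠ []
instance (file_discoveries : List (List String)) : Decidable (Pre_count_same_examples file_discoveries) := by unfold Pre_count_same_examples; infer_instance

def pvWitness_count_same_examples : List (List String) := [["a", "b", "a"], ["b", "a"]]

def Spec_count_same_examples (file_discoveries : List (List String)) (out : Int) : Prop := out = count_same_examples_alt file_discoveries
instance (file_discoveries : List (List String)) (out : Int) : Decidable (Spec_count_same_examples file_discoveries out) := by unfold Spec_count_same_examples; infer_instance

-- ===== CLAIM (what is proved, stated in full; the proofs are below) =====
def Claim_equal_count_same_examples : Prop := ∀ (file_discoveries : List (List String)), Dom_count_same_examples file_discoveries → Pre_count_same_examples file_discoveries → Spec_count_same_examples file_discoveries (count_same_examples file_discoveries)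

-- ===== LEMMAS AND PROOFS =====

-- membership in the intersection accumulator
theorem mem_inter_foldl (rest : List (List String)) (s0 : PySem.Set String) (x : String) :
    x ∈ rest.foldl (fun s m => PySem.Set.inter s (PySem.Set.ofList m)) s0 ↔
      x ∈ s0 ∧ ∀ m ∈ rest, x ∈ m := by
  induction rest generalizing s0 with
  | nil => simp
  | cons m rest ih =>
    simp only [List.foldl_cons, ih, PySem.Set.mem_inter, PySem.Set.mem_ofList, List.mem_cons]
    constructor
    · rintro ⟨⟨hs, hm⟩, hrest⟩
      exact ⟨hs, fun m' hm' => by rcases hm' with rfl | hm' <;> [exact hm; exact hrest m' hm']⟩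
    · rintro ⟨hs, hall⟩
      exact ⟨⟨hs, hall m (Or.inl rfl)⟩, fun m' hm' => hall m' (Or.inr hm')⟩

theorem count_same_examples_spec : Claim_equal_count_same_examples := by
  intro fd _ hpre
  unfold Spec_count_same_examples count_same_examples count_same_examples_alt
  obtain ⟨m0, rest, rfl⟩ : ∃ m0 rest, fd = m0 :: rest := by
    cases fd with
    | nil => exact absurd rfl hpre
    | cons a l => exact ⟨a, l, rfl⟩
  have hget : PySem.List.pyGet? (m0 :: rest) (0 : Int) = some m0 := by
    simp [PySem.List.pyGet?, PySem.List.pyIdx?]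
  rw [hget]
  simp only [PySem.List.slice_from_one, List.tail_cons]
  apply PySem.List.foldl_congr_mem
  intro acc x hx
  have hmem : PySem.Set.contains
      (rest.foldl (fun s m => PySem.Set.inter s (PySem.Set.ofList m)) (PySem.Set.ofList m0)) x
      = (m0 :: rest).all (fun m => decide (x ∈ m)) := by
    rw [Bool.eq_iff_iff, PySem.Set.contains_iff]
    simp only [mem_inter_foldl, PySem.Set.mem_ofList, List.all_eq_true, List.mem_cons,
      decide_eq_true_eq]
    constructor
    · rintro ⟨h0, hr⟩ m hm
      rcases hm with rfl | hm
      · exact h0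
      · exact hr m hm
    · intro h
      exact ⟨h m0 (Or.inl rfl), fun m hm => h m (Or.inr hm)⟩
  rw [hmem]
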